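-- pv_equiv track=rewrite | github.com/cassanof/CodeRM | coderm/dataset/reasoning_steps_to_cot.py | cottify_reasoning_steps
-- ===== SOURCE A (Python) =====
-- from typing import List
--
-- def punctuation_join(lst: List[str]) -> str:
--     """
--     Joins a list of strings with ", " unless it's the last element or if there is already a punctuation mark.
--     """
--     result = ""
--     for i, s in enumerate(lst):
--         if i != 0:
--             result += ", "
--         if s[-1] not in [".", "!", "?"]:
--             result += s
--         else:
--             result += s[:-1]
--     return result
--
-- def cottify_reasoning_steps(code: str) -> List[str]:
--     lines = code.split('\n')
--     comments = []
--     current_comment = []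
--
--     for line in lines:
--         stripped_line = line.lstrip()
--         if stripped_line.startswith('#'):
--             comment_content = stripped_line[1:].strip()
--             spaces = len(line) - len(stripped_line)
--             if len(current_comment) == 0:
--                 current_comment.append(f"# {' ' * spaces}- {comment_content}")
--             else:
--                 current_comment.append(comment_content)
--         else:
--             if current_comment:
--                 comments.append(punctuation_join(current_comment))
--                 current_comment = []
--
--     if current_comment:
--         comments.append(punctuation_join(current_comment))
--
--     return comments
-- ===== SOURCE B (Python) =====
-- from typing import List
--
--
-- def _is_comment(line: str) -> bool:
--     return line.lstrip().startswith('#')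
--
--
-- def _content(line: str) -> str:
--     return line.lstrip()[1:].strip()
--
--
-- def _render(group: List[str]) -> str:
--     first = group[0]
--     stripped = first.lstrip()
--     spaces = len(first) - len(stripped)
--     parts = [f"# {' ' * spaces}- {stripped[1:].strip()}"] + [_content(l) for l in group[1:]]
--     return ", ".join(p[:-1] if p[-1] in ".!?" else p for p in parts)
--
--
-- def cottify_reasoning_steps(code: str) -> List[str]:
--     rest = code.split('\n')
--     out = []
--     while rest:
--         if _is_comment(rest[0]):
--             k = 1
--             while k < len(rest) and _is_comment(rest[k]):
--                 k += 1
--             out.append(_render(rest[:k]))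
--             rest = rest[k:]
--         else:
--             rest = rest[1:]
--     return out
-- ===== Notes on version B (the rewrite author's own statement) =====
-- stated objective: idiomatic
-- what changed: B first cuts the line list into maximal runs of comment lines (group-then-render, outer/inner while over an explicit rest list) and joins each run with a single ", ".join over a comprehension, replacing A's one-pass accumulate-and-flush state machine and punctuation_join's index loop.
import Mathlib
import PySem

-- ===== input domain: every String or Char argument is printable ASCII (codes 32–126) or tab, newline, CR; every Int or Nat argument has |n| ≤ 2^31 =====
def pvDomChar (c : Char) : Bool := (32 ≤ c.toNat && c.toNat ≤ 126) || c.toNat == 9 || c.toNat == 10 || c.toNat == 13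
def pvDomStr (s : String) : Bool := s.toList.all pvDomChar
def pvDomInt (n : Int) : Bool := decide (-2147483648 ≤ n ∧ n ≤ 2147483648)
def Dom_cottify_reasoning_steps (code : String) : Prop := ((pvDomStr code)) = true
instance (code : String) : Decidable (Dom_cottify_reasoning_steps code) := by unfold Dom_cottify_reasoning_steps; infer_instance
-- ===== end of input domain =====

-- B groups the maximal runs of comment lines first and then renders each run with a
-- comprehension-style ", ".join, instead of A's accumulate-and-flush single pass; objective: idiomatic.

-- shared helpers: these transliterate expressions that appear verbatim in BOTH Python sources
-- line.lstrip().startswith('#')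
def pvIsComment (line : List Char) : Bool := PySem.Chars.startswith (PySem.Chars.lstrip line) ['#']
-- line.lstrip()[1:].strip()
def pvContent (line : List Char) : List Char :=
  PySem.Chars.strip (PySem.List.slice (PySem.Chars.lstrip line) (some 1) none)
-- f"# {' ' * spaces}- {content}" with spaces = len(line) - len(lstripped line)
def pvFirstFmt (line : List Char) : List Char :=
  let stripped := PySem.Chars.lstrip line
  ['#', ' '] ++ List.replicate (line.length - stripped.length) ' ' ++ ['-', ' ']
    ++ PySem.Chars.strip (PySem.List.slice stripped (some 1) none)
-- code.split('\n')
def pvLines (code : String) : List (List Char) := PySem.Chars.splitOn code.toList ['\n']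

-- ===== PORT A =====
-- punctuation_join's loop body; on an empty s Python raises IndexError (pyGet? = none,
-- excluded by Pre_); the port appends s there as a total default.
def pvPJgo : List (List Char) → Nat → List Char → List Char
  | [], _, res => res
  | s :: r, i, res =>
      pvPJgo r (i + 1)
        ((if i ≠ 0 then res ++ [',', ' '] else res) ++
          (match PySem.List.pyGet? s (-1) with
           | some c => if ¬ (c = '.' ∨ c = '!' ∨ c = '?') then s
                       else PySem.List.slice s none (some (-1))
           | none => s))

def pvPJ (lst : List (List Char)) : List Char := pvPJgo lst 0 []

-- the for-loop state: (comments, current_comment)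
def pvStepA (st : List (List Char) × List (List Char)) (line : List Char) :
    List (List Char) × List (List Char) :=
  if pvIsComment line then
    if st.2.length = 0 then (st.1, st.2 ++ [pvFirstFmt line])
    else (st.1, st.2 ++ [pvContent line])
  else
    if st.2 ≠ [] then (st.1 ++ [pvPJ st.2], []) else st

def cottify_reasoning_steps (code : String) : List String :=
  let st := (pvLines code).foldl pvStepA ([], [])
  (if st.2 ≠ [] then st.1 ++ [pvPJ st.2] else st.1).map String.ofList

-- ===== PORT B =====
-- p[:-1] if p[-1] in ".!?" else p  (empty p raises in Python: excluded by Pre_, default p here)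
def pvStripPunct (s : List Char) : List Char :=
  match PySem.List.pyGet? s (-1) with
  | some c => if c = '.' ∨ c = '!' ∨ c = '?' then PySem.List.slice s none (some (-1)) else s
  | none => s

-- _render(group): first line formatted, remaining contents, joined with ", "
def pvRender (g : List (List Char)) : List Char :=
  match g with
  | [] => []  -- unreachable: runs are nonempty
  | f :: rest =>
      PySem.Chars.join [',', ' '] ((pvFirstFmt f :: rest.map pvContent).map pvStripPunct)

-- the outer while over rest: a comment head takes the whole comment run, else drop the line
def pvLoopB : List (List Char) → List (List Char)
  | [] => []
  | l :: ls =>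
      if h : pvIsComment l then
        pvRender ((l :: ls).takeWhile pvIsComment) :: pvLoopB ((l :: ls).dropWhile pvIsComment)
      else pvLoopB ls
  termination_by ls => ls.length
  decreasing_by
    · simp only [List.dropWhile_cons, h, if_pos, List.length_cons]
      exact Nat.lt_succ_of_le (List.length_dropWhile_le _ _)
    · simp

def cottify_reasoning_steps_alt (code : String) : List String :=
  (pvLoopB (pvLines code)).map String.ofList

-- ===== PRECONDITION & SPEC =====
-- Pre_ excludes exactly the inputs where both Pythons raise IndexError: a comment line whose
-- '#'-stripped content is empty and which directly follows another comment line (punctuation_join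
-- then evaluates s[-1] on an empty string).
def Pre_cottify_reasoning_steps (code : String) : Prop :=
  ∀ p ∈ (pvLines code).zip (pvLines code).tail,
    ¬ (pvIsComment p.1 = true ∧ pvIsComment p.2 = true ∧ pvContent p.2 = [])
instance (code : String) : Decidable (Pre_cottify_reasoning_steps code) := by
  unfold Pre_cottify_reasoning_steps; infer_instance

def pvWitness_cottify_reasoning_steps : String := "# a\n#b.\nx\n  # c?\ny"

def Spec_cottify_reasoning_steps (code : String) (out : List String) : Prop := out = cottify_reasoning_steps_alt code
instance (code : String) (out : List String) : Decidable (Spec_cottify_reasoning_steps code out) := by unfold Spec_cottify_reasoning_steps; infer_instance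

-- ===== CLAIM (what is proved, stated in full; the proofs are below) =====
def Claim_equal_cottify_reasoning_steps : Prop := ∀ (code : String), Dom_cottify_reasoning_steps code → Pre_cottify_reasoning_steps code → Spec_cottify_reasoning_steps code (cottify_reasoning_steps code)

-- ===== LEMMAS AND PROOFS =====

-- join with separator sep of a nonempty list, flattened form
lemma pv_join_cons (sep x : List Char) (xs : List (List Char)) :
    PySem.Chars.join sep (x :: xs) = x ++ (xs.map (sep ++ ·)).flatten := by
  induction xs generalizing x with
  | nil => simp [PySem.Chars.join_singleton]
  | cons y ys ih => rw [PySem.Chars.join_cons_cons, ih y]; simp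

-- the punctuation_join inner loop, once past the first element
lemma pvPJgo_eq (r : List (List Char)) : ∀ (i : Nat) (res : List Char), i ≠ 0 →
    pvPJgo r i res = res ++ ((r.map pvStripPunct).map ([',', ' '] ++ ·)).flatten := by
  induction r with
  | nil => intro i res _; simp [pvPJgo]
  | cons s t ih =>
    intro i res hi
    rw [pvPJgo, if_pos hi, ih (i + 1) _ (by omega)]
    cases h : PySem.List.pyGet? s (-1) with
    | none => simp [h, pvStripPunct]
    | some c =>
      by_cases hc : c = '.' ∨ c = '!' ∨ c = '?' <;>
        simp [h, hc, pvStripPunct]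

-- A's punctuation_join equals B's ", ".join over the stripped pieces
lemma pvPJ_eq_join (lst : List (List Char)) :
    pvPJ lst = PySem.Chars.join [',', ' '] (lst.map pvStripPunct) := by
  cases lst with
  | nil => simp [pvPJ, pvPJgo, PySem.Chars.join_nil]
  | cons x xs =>
    rw [pvPJ, pvPJgo, if_neg (by omega : ¬ (0 : Nat) ≠ 0),
      pvPJgo_eq xs 1 _ (by omega), List.map_cons, pv_join_cons]
    cases h : PySem.List.pyGet? x (-1) with
    | none => simp [h, pvStripPunct]
    | some c =>
      by_cases hc : c = '.' ∨ c = '!' ∨ c = '?' <;>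
        simp [h, hc, pvStripPunct]

lemma pvLoopB_cons_pos (l : List Char) (ls : List (List Char)) (h : pvIsComment l = true) :
    pvLoopB (l :: ls) =
      pvRender (l :: ls.takeWhile pvIsComment) :: pvLoopB (ls.dropWhile pvIsComment) := by
  conv_lhs => rw [pvLoopB.eq_def]
  simp [h]

lemma pvLoopB_cons_neg (l : List Char) (ls : List (List Char)) (h : ¬ pvIsComment l = true) :
    pvLoopB (l :: ls) = pvLoopB ls := by
  conv_lhs => rw [pvLoopB.eq_def]
  simp [h]

def pvFinishA (st : List (List Char) × List (List Char)) : List (List Char) :=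
  if st.2 ≠ [] then st.1 ++ [pvPJ st.2] else st.1

-- the main loop invariant: A's fold, with pending run cur, produces acc ++ B's groups
lemma pv_loop_eq (lines : List (List Char)) :
    (∀ (acc cur : List (List Char)), cur ≠ [] →
      pvFinishA (lines.foldl pvStepA (acc, cur)) =
        acc ++ pvPJ (cur ++ (lines.takeWhile pvIsComment).map pvContent)
          :: pvLoopB (lines.dropWhile pvIsComment)) ∧
    (∀ acc : List (List Char),
      pvFinishA (lines.foldl pvStepA (acc, [])) = acc ++ pvLoopB lines) := by
  induction lines with
  | nil =>
    refine ⟨fun acc cur hcur => ?_, fun acc => ?_⟩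
    · simp [pvFinishA, pvLoopB, hcur]
    · simp [pvFinishA, pvLoopB]
  | cons l ls ih =>
    obtain ⟨ihP, ihQ⟩ := ih
    constructor
    · intro acc cur hcur
      by_cases h : pvIsComment l
      · rw [List.foldl_cons]
        have hstep : pvStepA (acc, cur) l = (acc, cur ++ [pvContent l]) := by
          simp [pvStepA, h, List.length_eq_zero_iff, hcur]
        rw [hstep, ihP acc (cur ++ [pvContent l]) (by simp)]
        simp [h]
      · rw [List.foldl_cons]
        have hstep : pvStepA (acc, cur) l = (acc ++ [pvPJ cur], []) := by
          simp [pvStepA, h, hcur]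
        rw [hstep, ihQ]
        simp [h, pvLoopB_cons_neg l ls h]
    · intro acc
      by_cases h : pvIsComment l
      · rw [List.foldl_cons]
        have hstep : pvStepA (acc, []) l = (acc, [pvFirstFmt l]) := by
          simp [pvStepA, h]
        rw [hstep, ihP acc [pvFirstFmt l] (by simp), pvLoopB_cons_pos l ls h]
        simp [pvRender, pvPJ_eq_join]
      · rw [List.foldl_cons]
        have hstep : pvStepA (acc, []) l = (acc, []) := by
          simp [pvStepA, h]
        rw [hstep, ihQ, pvLoopB_cons_neg l ls h]

-- ===== VERDICT (by name: the statement is the Claim_ definition above) =====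
theorem cottify_reasoning_steps_spec : Claim_equal_cottify_reasoning_steps := by
  intro code _ _
  unfold Spec_cottify_reasoning_steps cottify_reasoning_steps cottify_reasoning_steps_alt
  have h := (pv_loop_eq (pvLines code)).2 []
  simp only [pvFinishA] at h
  simp only []
  rw [h]
  simp
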